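-- pv_equiv track=rewrite | github.com/jon-the-dev/aws-album-manager-sls | app/app2.py | validate_s3_key_name
-- ===== SOURCE A (Python) =====
-- def validate_s3_key_name(key_name):
--     """
--     Sanitize S3 key name to prevent path traversal and invalid characters.
--
--     Args:
--         key_name (str): Original key name
--
--     Returns:
--         str: Sanitized key name
--     """
--     if not key_name:
--         return ''
--
--     # Remove path traversal attempts
--     key_name = key_name.replace('..', '_')
--
--     # Replace invalid characters
--     invalid_chars = ['\\', '<', '>', ':', '"', '|', '?', '*']
--     for char in invalid_chars:
--         key_name = key_name.replace(char, '_')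
--
--     return key_name.strip('/')
-- ===== SOURCE B (Python) =====
-- def validate_s3_key_name(key_name):
--     """Sanitize S3 key name: single-pass character substitution instead of
--     repeated whole-string replace passes."""
--     if not key_name:
--         return ''
--     key_name = key_name.replace('..', '_')
--     invalid = set('\\<>:"|?*')
--     key_name = ''.join('_' if c in invalid else c for c in key_name)
--     return key_name.strip('/')
-- ===== Notes on version B (the rewrite author's own statement) =====
-- stated objective: idiomatic
-- what changed: After the unchanged dot-dot collapse step, the loop of eight whole-string replace passes is replaced by a single left-to-right pass that substitutes an underscore for each character found in an invalid-character set.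
import Mathlib
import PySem

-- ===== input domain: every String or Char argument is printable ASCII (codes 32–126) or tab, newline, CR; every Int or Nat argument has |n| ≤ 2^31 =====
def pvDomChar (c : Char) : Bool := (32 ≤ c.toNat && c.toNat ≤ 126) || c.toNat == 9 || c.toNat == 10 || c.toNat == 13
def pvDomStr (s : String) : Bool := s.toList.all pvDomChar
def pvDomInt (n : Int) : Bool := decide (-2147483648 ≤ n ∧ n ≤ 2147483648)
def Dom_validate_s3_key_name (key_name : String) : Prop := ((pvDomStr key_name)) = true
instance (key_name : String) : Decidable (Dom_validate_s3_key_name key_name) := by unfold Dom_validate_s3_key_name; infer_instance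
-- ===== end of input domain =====

-- B replaces A's loop of eight whole-string replace passes by one single character pass; objective: idiomatic.


-- ===== PORT A =====
def validate_s3_key_name (key_name : String) : String :=
  if key_name = "" then ""
  else
    -- for char in invalid_chars: key_name = key_name.replace(char, '_'), applied after
    -- key_name = key_name.replace('..', '_'); finally key_name.strip('/')
    PySem.Str.stripChars
      ((['\\', '<', '>', ':', '"', '|', '?', '*'] : List Char).foldl
        (fun s c => PySem.Str.replace s (String.ofList [c]) "_")
        (PySem.Str.replace key_name ".." "_"))
      "/"

-- ===== PORT B =====
def validate_s3_key_name_alt (key_name : String) : String :=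
  if key_name = "" then ""
  else
    -- ''.join('_' if c in invalid else c for c in key_name.replace('..','_')), then .strip('/')
    PySem.Str.stripChars
      (String.ofList ((PySem.Str.replace key_name ".." "_").toList.map
        (fun c => if (PySem.Set.ofList ['\\', '<', '>', ':', '"', '|', '?', '*']).contains c then '_' else c)))
      "/"

-- ===== PRECONDITION & SPEC =====
def Spec_validate_s3_key_name (key_name : String) (out : String) : Prop := out = validate_s3_key_name_alt key_name
instance (key_name : String) (out : String) : Decidable (Spec_validate_s3_key_name key_name out) := by unfold Spec_validate_s3_key_name; infer_instance

-- ===== CLAIM (what is proved, stated in full; the proofs are below) =====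
def Claim_equal_validate_s3_key_name : Prop := ∀ (key_name : String), Dom_validate_s3_key_name key_name → Spec_validate_s3_key_name key_name (validate_s3_key_name key_name)

-- ===== LEMMAS AND PROOFS =====

-- Replacing a single-character pattern by a single character is a pointwise map.
theorem replace_go_single (c d : Char) :
    ∀ (l : List Char) (acc : List Char) (fuel : Nat), l.length ≤ fuel →
      PySem.Chars.replace.go [c] [d] fuel l acc
        = acc.reverse ++ l.map (fun x => if x = c then d else x) := by
  intro l
  induction l with
  | nil =>
    intro acc fuel _
    cases fuel <;> simp [PySem.Chars.replace.go]
  | cons x t ih =>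
    intro acc fuel hf
    cases fuel with
    | zero => simp at hf
    | succ n =>
      by_cases hx : x = c
      · subst hx
        have hpre : [x].isPrefixOf (x :: t) = true := by simp [List.isPrefixOf]
        simp only [PySem.Chars.replace.go, hpre, if_pos]
        simp [ih _ n (by simpa using hf)]
      · have hpre : [c].isPrefixOf (x :: t) = false := by
          simp [List.isPrefixOf]
          exact fun h => (hx h.symm).elim
        simp only [PySem.Chars.replace.go, hpre]
        simp [ih _ n (by simpa using hf), hx]

theorem replace_single (cs : List Char) (c d : Char) :
    PySem.Chars.replace cs [c] [d] = cs.map (fun x => if x = c then d else x) := by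
  simpa [PySem.Chars.replace] using replace_go_single c d cs [] cs.length le_rfl

-- The A-side loop of Str.replace passes, seen on character lists.
theorem foldl_replace_toList (L : List Char) :
    ∀ (s : String),
      (L.foldl (fun s c => PySem.Str.replace s (String.ofList [c]) "_") s).toList
        = L.foldl (fun cs c => PySem.Chars.replace cs [c] ['_']) s.toList := by
  induction L with
  | nil => intro s; rfl
  | cons c t ih =>
    intro s
    simp only [List.foldl_cons, ih]
    congr 1
    simp [PySem.Str.replace]

-- Sequential single-char replaces into '_' collapse to one membership map,
-- provided '_' itself is not among the replaced characters.
theorem foldl_replace_eq_map (L : List Char) :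
    ∀ (cs : List Char), L.contains '_' = false →
      L.foldl (fun cs c => PySem.Chars.replace cs [c] ['_']) cs
        = cs.map (fun x => if L.contains x then '_' else x) := by
  induction L with
  | nil => intro cs _; simp
  | cons c t ih =>
    intro cs h
    have h' : t.contains '_' = false := by
      simp only [List.contains_cons, Bool.or_eq_false_iff] at h
      exact h.2
    rw [List.foldl_cons, ih _ h', replace_single, List.map_map]
    apply List.map_congr_left
    intro a _
    by_cases ha : a = c
    · subst ha
      simp [Function.comp_apply]
    · simp [Function.comp_apply, ha]

-- ===== VERDICT (by name: the statement is the Claim_ definition above) =====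
theorem validate_s3_key_name_spec : Claim_equal_validate_s3_key_name := by
  intro key_name _
  unfold Spec_validate_s3_key_name validate_s3_key_name validate_s3_key_name_alt
  by_cases h : key_name = ""
  · simp [h]
  · simp only [if_neg h]
    refine congrArg (fun s => PySem.Str.stripChars s "/") ?_
    set k1 := PySem.Str.replace key_name ".." "_" with hk1
    have hL : (['\\', '<', '>', ':', '"', '|', '?', '*'] : List Char).contains '_' = false := by
      decide
    have htl :
        ((['\\', '<', '>', ':', '"', '|', '?', '*'] : List Char).foldl
            (fun s c => PySem.Str.replace s (String.ofList [c]) "_") k1).toList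
          = k1.toList.map (fun x =>
              if (['\\', '<', '>', ':', '"', '|', '?', '*'] : List Char).contains x then '_' else x) := by
      rw [foldl_replace_toList, foldl_replace_eq_map _ _ hL]
    have hset : (PySem.Set.ofList ['\\', '<', '>', ':', '"', '|', '?', '*'] : PySem.Set Char)
        = (['\\', '<', '>', ':', '"', '|', '?', '*'] : List Char) := by decide
    have hmem : ∀ x : Char,
        (PySem.Set.ofList ['\\', '<', '>', ':', '"', '|', '?', '*']).contains x
          = (['\\', '<', '>', ':', '"', '|', '?', '*'] : List Char).contains x := by
      intro x
      rw [hset]; rfl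
    calc
      (['\\', '<', '>', ':', '"', '|', '?', '*'] : List Char).foldl
          (fun s c => PySem.Str.replace s (String.ofList [c]) "_") k1
        = String.ofList (((['\\', '<', '>', ':', '"', '|', '?', '*'] : List Char).foldl
            (fun s c => PySem.Str.replace s (String.ofList [c]) "_") k1).toList) := String.ofList_toList.symm
      _ = String.ofList (k1.toList.map (fun c =>
            if (PySem.Set.ofList ['\\', '<', '>', ':', '"', '|', '?', '*']).contains c then '_' else c)) := by
          rw [htl]
          exact congrArg String.ofList (List.map_congr_left (fun a _ => by rw [hmem]))
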